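-- pv_equiv track=rewrite | github.com/ErwanCal/Projet_Genomique_Charvy_Cruche_Dalmau | Tentative_rendu.py | link_reads
-- ===== SOURCE A (Python) =====
-- def link_reads (l_pos,k):
--     """
--     Links the kmer of the reads
--     Args:
--         l_pos : list of tuple : (kmer_pos_read, kmer_pos_gen)
--         kmer_pos_read : position of the kmer in the read
--         kmer_pos_gen : possible position of the kmer in the genom
--         k : length of kmers
--     Return:
--
--     """
--     valid=False # true if there is a valid position
--     val_pos=[] # list of valid starting position of the read in the genom
--     comment=""
--     for i in l_pos[0][1] :# for each first position,we add the next part to see if it exists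
--         cur_pos=1
--         if(cur_pos==len(l_pos)): # if there is only one position in the list
--             if (i!=-1): #if there is only a position -1 it returns False and no position
--                 valid=True
--                 val_pos.append(i)
--
--         else :  # if there is more than 1 element iiin the list
--             pos_gen=i+k # next position of the kmer of the read in the genom
--             while (pos_gen in l_pos[cur_pos][1]) : # we try to find the next kmer in the next list of position of kmer
--                 cur_pos+=1
--                 if(cur_pos==len(l_pos)): # when there is the whole read in the genom
--                     valid=True
--                     val_pos.append(i)# to return the position of the read(s) in the genom
--                     break
--                 else :
--                     pos_gen+=k
--     if(valid==False):
--         for i in l_pos[0][1] :# for each first position,we look at the last kmer to see if it can correpond with the genom but with mutation between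
--             cur_pos=1
--             if(cur_pos!=len(l_pos)):   # if there is more than 1 element in the list
--                 pos_gen=i+k*(len(l_pos)-1) #  position of the last kmer of the read in the genom
--                 if (pos_gen in l_pos[-1][1]) : # we try to find the last position in the last element of the list
--                         comment+="possible mutation"
--                         val_pos.append(i)# to return the position of the read(s) in the genom
--                         valid = True
--                         break
--
--     return (valid, val_pos,comment)
-- ===== SOURCE B (Python) =====
-- def link_reads(l_pos, k):
--     first = l_pos[0][1]
--     n = len(l_pos)
--     if n == 1:
--         val_pos = [i for i in first if i != -1]
--     else:
--         # intersect shifted index sets: i survives iff i + j*k occurs at level j for every j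
--         good = set(first)
--         for j, (_, poss) in enumerate(l_pos[1:], 1):
--             good &= {p - j * k for p in poss}
--         val_pos = [i for i in first if i in good]
--     if val_pos:
--         return (True, val_pos, "")
--     if n > 1:
--         last = l_pos[-1][1]
--         for i in first:
--             if i + k * (n - 1) in last:
--                 return (True, [i], "possible mutation")
--     return (False, [], "")
-- ===== Notes on version B (the rewrite author's own statement) =====
-- stated objective: alternative
-- what changed: Phase 1 no longer extends each candidate chain with a while-scan per start position: B builds shifted position sets {p - j*k} per level once, intersects them, and filters the first level's positions by membership in that intersection.
-- outside the precondition, e.g. on link_reads([], 0): A raises IndexError, B raises IndexError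
import Mathlib
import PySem

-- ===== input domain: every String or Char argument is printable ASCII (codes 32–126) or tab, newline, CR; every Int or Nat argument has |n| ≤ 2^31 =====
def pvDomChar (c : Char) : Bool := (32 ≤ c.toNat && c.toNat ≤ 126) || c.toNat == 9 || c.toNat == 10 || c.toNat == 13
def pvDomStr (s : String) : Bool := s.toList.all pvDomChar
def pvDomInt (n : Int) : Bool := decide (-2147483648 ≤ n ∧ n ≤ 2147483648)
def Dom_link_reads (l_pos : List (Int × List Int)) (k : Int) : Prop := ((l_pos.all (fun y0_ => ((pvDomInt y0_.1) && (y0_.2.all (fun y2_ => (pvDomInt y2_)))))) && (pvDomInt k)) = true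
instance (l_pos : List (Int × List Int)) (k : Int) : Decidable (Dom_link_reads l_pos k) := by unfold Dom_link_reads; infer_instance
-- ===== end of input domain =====

-- B replaces A's per-candidate chain-extension scans by one pass that intersects
-- shifted per-level position sets and then filters the first level (objective: alternative).

-- ===== PORT A =====
-- pvAWhile: the inner 'while pos_gen in l_pos[cur_pos][1]' loop; the fuel argument bounds the
-- iterations (each step increments cur_pos, which never exceeds l_pos.length).
-- pvAPhase1: the first 'for i in l_pos[0][1]' loop, carrying (valid, val_pos).
-- pvAPhase2: the second loop, a scan breaking on the first i whose last kmer matches; the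
-- 'cur_pos != len(l_pos)' test of each iteration is part of the predicate.
def pvAWhile (l_pos : List (Int × List Int)) (k : Int) : Nat → Nat → Int → Bool
  | 0, _, _ => false
  | fuel + 1, cur, pos =>
    if pos ∈ (PySem.List.pyGetD l_pos (cur : Int) (0, [])).2 then
      if cur + 1 == l_pos.length then true
      else pvAWhile l_pos k fuel (cur + 1) (pos + k)
    else false

def pvAPhase1 (l_pos : List (Int × List Int)) (k : Int) : Bool × List Int :=
  (PySem.List.pyGetD l_pos 0 (0, [])).2.foldl
    (fun st i =>
      if l_pos.length == 1 then
        if i != -1 then (true, st.2 ++ [i]) else st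
      else
        if pvAWhile l_pos k l_pos.length 1 (i + k) then (true, st.2 ++ [i]) else st)
    (false, [])

def pvAPhase2 (l_pos : List (Int × List Int)) (k : Int) : Option Int :=
  (PySem.List.pyGetD l_pos 0 (0, [])).2.find?
    (fun i => decide (l_pos.length ≠ 1) &&
      decide ((i + k * ((l_pos.length : Int) - 1)) ∈ (PySem.List.pyGetD l_pos (-1) (0, [])).2))

def link_reads (l_pos : List (Int × List Int)) (k : Int) : Bool × List Int × String :=
  let st := pvAPhase1 l_pos k
  if st.1 == false then
    match pvAPhase2 l_pos k with
    | some i => (true, st.2 ++ [i], "possible mutation")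
    | none => (st.1, st.2, "")
  else (st.1, st.2, "")

-- ===== PORT B =====
def link_reads_alt (l_pos : List (Int × List Int)) (k : Int) : Bool × List Int × String :=
  let first := (PySem.List.pyGetD l_pos 0 (0, [])).2
  let n := l_pos.length
  let val_pos :=
    if n == 1 then first.filter (fun i => i != -1)
    else
      let good :=
        (PySem.List.enumerate (PySem.List.slice l_pos (some 1) none) 1).foldl
          (fun g jp =>
            PySem.Set.inter g (PySem.Set.ofList (jp.2.2.map (fun p => p - jp.1 * k))))
          (PySem.Set.ofList first)
      first.filter (fun i => PySem.Set.contains good i)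
  if val_pos != [] then (true, val_pos, "")
  else if decide (n > 1) then
    match first.find?
        (fun i => decide ((i + k * ((n : Int) - 1)) ∈ (PySem.List.pyGetD l_pos (-1) (0, [])).2)) with
    | some i => (true, [i], "possible mutation")
    | none => (false, [], "")
  else (false, [], "")


-- ===== PRECONDITION & SPEC =====
-- Pre_ excludes only the empty list, on which the Python A raises IndexError at l_pos[0]
def Pre_link_reads (l_pos : List (Int × List Int)) (k : Int) : Prop := l_pos ≠ []
instance (l_pos : List (Int × List Int)) (k : Int) : Decidable (Pre_link_reads l_pos k) := by unfold Pre_link_reads; infer_instance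
def pvWitness_link_reads : (List (Int × List Int)) × Int := ([(0, [2, 5]), (1, [4])], 2)

def Spec_link_reads (l_pos : List (Int × List Int)) (k : Int) (out : Bool × List Int × String) : Prop := out = link_reads_alt l_pos k
instance (l_pos : List (Int × List Int)) (k : Int) (out : Bool × List Int × String) : Decidable (Spec_link_reads l_pos k out) := by unfold Spec_link_reads; infer_instance

-- ===== CLAIM (what is proved, stated in full; the proofs are below) =====
def Claim_equal_link_reads : Prop := ∀ (l_pos : List (Int × List Int)) (k : Int), Dom_link_reads l_pos k → Pre_link_reads l_pos k → Spec_link_reads l_pos k (link_reads l_pos k)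

-- ===== LEMMAS AND PROOFS =====
theorem pvFoldl_if (p : Int → Bool) (xs : List Int) :
    ∀ (v : Bool) (acc : List Int),
      xs.foldl (fun st i => if p i then (true, st.2 ++ [i]) else st) (v, acc)
        = (v || xs.any p, acc ++ xs.filter p) := by
  induction xs with
  | nil => simp
  | cons x xs ih =>
    intro v acc
    by_cases h : p x <;> simp [List.foldl_cons, h, ih]

theorem pvAWhile_spec (l_pos : List (Int × List Int)) (k : Int) :
    ∀ (fuel cur : Nat) (pos : Int), cur < l_pos.length → l_pos.length - cur ≤ fuel →
      (pvAWhile l_pos k fuel cur pos = true ↔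
        ∀ j : Nat, cur + j < l_pos.length →
          pos + (j : Int) * k ∈ (l_pos.getD (cur + j) (0, [])).2) := by
  intro fuel
  induction fuel with
  | zero => intro cur pos h1 h2; omega
  | succ fuel ih =>
    intro cur pos h1 h2
    rw [pvAWhile]
    by_cases hmem : pos ∈ (PySem.List.pyGetD l_pos (cur : Int) (0, [])).2
    · have hget : PySem.List.pyGetD l_pos (cur : Int) (0, []) = l_pos.getD cur (0, []) :=
        PySem.List.pyGetD_natCast ..
      by_cases hend : cur + 1 = l_pos.length
      · simp only [hmem, if_true, hend, beq_self_eq_true, if_true]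
        constructor
        · intro _ j hj
          have hj0 : j = 0 := by omega
          subst hj0
          simpa [hget] using hmem
        · intro _; trivial
      · have hlt : cur + 1 < l_pos.length := by omega
        rw [if_pos hmem, if_neg (by simpa using hend), ih (cur + 1) (pos + k) hlt (by omega)]
        constructor
        · intro h j hj
          cases j with
          | zero => simpa [hget] using hmem
          | succ m =>
            have := h m (by omega)
            have e1 : cur + (m + 1) = cur + 1 + m := by omega
            have e2 : pos + ((m : Int) + 1) * k = pos + k + (m : Int) * k := by ring
            rw [e1]
            push_cast
            rw [e2]
            exact this
        · intro h j hj
          have := h (j + 1) (by omega)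
          have e1 : cur + (j + 1) = cur + 1 + j := by omega
          rw [e1] at this
          push_cast at this
          have e2 : pos + ((j : Int) + 1) * k = pos + k + (j : Int) * k := by ring
          rw [e2] at this
          exact this
    · rw [if_neg hmem]
      constructor
      · intro h; cases h
      · intro h
        have h0 : pos ∈ (l_pos.getD cur (0, [])).2 := by simpa using h 0 (by omega)
        exact absurd h0 (by rwa [PySem.List.pyGetD_natCast] at hmem)

theorem pvGood_mem (k : Int) :
    ∀ (tl : List (Int × List Int)) (s : Int) (g : PySem.Set Int) (x : Int),
      (x ∈ (PySem.List.enumerate tl s).foldl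
          (fun g jp =>
            PySem.Set.inter g (PySem.Set.ofList (jp.2.2.map (fun p => p - jp.1 * k)))) g) ↔
        (x ∈ g ∧ ∀ idx : Nat, idx < tl.length → x + (s + (idx : Int)) * k ∈ (tl.getD idx (0, [])).2) := by
  intro tl
  induction tl with
  | nil => intro s g x; simp [PySem.List.enumerate_nil]
  | cons p rest ih =>
    intro s g x
    rw [PySem.List.enumerate_cons, List.foldl_cons, ih]
    rw [PySem.Set.mem_inter, PySem.Set.mem_ofList]
    constructor
    · rintro ⟨⟨hg, hmap⟩, hrest⟩
      refine ⟨hg, ?_⟩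
      intro idx hidx
      cases idx with
      | zero =>
        obtain ⟨q, hq, he⟩ := List.mem_map.mp hmap
        have hqe : x + (s + ((0 : Nat) : Int)) * k = q := by rw [← he]; push_cast; ring
        simp only [List.getD_cons_zero]
        rw [hqe]; exact hq
      | succ m =>
        have := hrest m (by simpa using hidx)
        have e : s + ((m : Int) + 1) = s + 1 + m := by ring
        push_cast
        rw [e]
        exact this
    · rintro ⟨hg, hall⟩
      refine ⟨⟨hg, ?_⟩, ?_⟩
      · have := hall 0 (by simp)
        exact List.mem_map.mpr ⟨x + s * k, by simpa using this, by ring⟩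
      · intro m hm
        have := hall (m + 1) (by simpa using Nat.succ_lt_succ hm)
        push_cast at this
        have e : s + ((m : Int) + 1) = s + 1 + m := by ring
        rw [e] at this
        exact this

def pvPA (l_pos : List (Int × List Int)) (k : Int) (i : Int) : Bool :=
  if l_pos.length == 1 then i != -1 else pvAWhile l_pos k l_pos.length 1 (i + k)

theorem pvAPhase1_eq (l_pos : List (Int × List Int)) (k : Int) :
    pvAPhase1 l_pos k =
      ((PySem.List.pyGetD l_pos 0 (0, [])).2.any (pvPA l_pos k),
       (PySem.List.pyGetD l_pos 0 (0, [])).2.filter (pvPA l_pos k)) := by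
  unfold pvAPhase1
  have hstep : (fun (st : Bool × List Int) i =>
      if l_pos.length == 1 then
        if i != -1 then (true, st.2 ++ [i]) else st
      else
        if pvAWhile l_pos k l_pos.length 1 (i + k) then (true, st.2 ++ [i]) else st)
      = fun (st : Bool × List Int) i => if pvPA l_pos k i then (true, st.2 ++ [i]) else st := by
    funext st i
    unfold pvPA
    by_cases hc : l_pos.length == 1 <;> simp [hc]
  rw [hstep, pvFoldl_if]
  simp

theorem pv_main : ∀ (l_pos : List (Int × List Int)) (k : Int), l_pos ≠ [] →
    link_reads l_pos k = link_reads_alt l_pos k := by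
  intro l_pos k hpre
  obtain ⟨h, tl, rfl⟩ := List.exists_cons_of_ne_nil hpre
  cases tl with
  | nil =>
    -- length = 1
    rw [link_reads, link_reads_alt, pvAPhase1_eq]
    simp only [PySem.List.pyGetD_zero_cons, List.length_cons, List.length_nil, Nat.zero_add,
      beq_self_eq_true, if_true]
    have hpa : pvPA [h] k = fun i => i != -1 := by
      funext i; unfold pvPA; simp
    rw [hpa]
    by_cases hfe : h.2.filter (fun i => i != -1) = []
    · have hany : h.2.any (fun i => i != -1) = false :=
        List.any_eq_false.mpr (List.filter_eq_nil_iff.mp hfe)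
      have hp2 : pvAPhase2 [h] k = none := by
        unfold pvAPhase2
        exact List.find?_eq_none.mpr (fun x _ => by simp)
      simp [hany, hfe, hp2]
    · have hany : h.2.any (fun i => i != -1) = true := by
        obtain ⟨x, hx⟩ := List.exists_mem_of_ne_nil _ hfe
        have := List.mem_filter.mp hx
        exact List.any_eq_true.mpr ⟨x, this.1, this.2⟩
      simp [hany, hfe]
  | cons t rest =>
    -- length ≥ 2
    have hlen : (h :: t :: rest).length = rest.length + 2 := by simp
    have hne1 : (h :: t :: rest).length ≠ 1 := by simp
    rw [link_reads, link_reads_alt, pvAPhase1_eq]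
    simp only [PySem.List.pyGetD_zero_cons]
    have hlenb : ((h :: t :: rest).length == 1) = false := by
      simp
    have hslice : PySem.List.slice (h :: t :: rest) (some 1) none = t :: rest := by
      rw [PySem.List.slice_from_one]; rfl
    -- the two filters agree
    have hfeq : h.2.filter (pvPA (h :: t :: rest) k)
        = h.2.filter (fun i =>
            PySem.Set.contains
              ((PySem.List.enumerate (PySem.List.slice (h :: t :: rest) (some 1) none) 1).foldl
                (fun g jp =>
                  PySem.Set.inter g (PySem.Set.ofList (jp.2.2.map (fun p => p - jp.1 * k))))
                (PySem.Set.ofList h.2)) i) := by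
      apply List.filter_congr
      intro i hi
      rw [Bool.eq_iff_iff]
      unfold pvPA
      simp only [hlenb, Bool.false_eq_true, if_false]
      rw [pvAWhile_spec (h :: t :: rest) k (h :: t :: rest).length 1 (i + k)
        (by simp) (by omega)]
      rw [PySem.Set.contains_iff, hslice, pvGood_mem]
      constructor
      · intro ha
        refine ⟨(PySem.Set.mem_ofList _ _).mpr hi, ?_⟩
        intro idx hidx
        have hidx' : 1 + idx < (h :: t :: rest).length := by simp at hidx ⊢; omega
        have hmem := ha idx hidx'
        rw [show 1 + idx = idx + 1 from by omega, List.getD_cons_succ] at hmem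
        have e : i + ((1 : Int) + (idx : Int)) * k = i + k + (idx : Int) * k := by ring
        rw [e]
        exact hmem
      · rintro ⟨_, hall⟩
        intro j hj
        have hj' : j < (t :: rest).length := by simp at hj ⊢; omega
        have hmem := hall j hj'
        have e : i + ((1 : Int) + (j : Int)) * k = i + k + (j : Int) * k := by ring
        rw [e] at hmem
        rw [show 1 + j = j + 1 from by omega, List.getD_cons_succ]
        exact hmem
    have hp2 : pvAPhase2 (h :: t :: rest) k
        = h.2.find? (fun i =>
            decide ((i + k * (((h :: t :: rest).length : Int) - 1))
              ∈ (PySem.List.pyGetD (h :: t :: rest) (-1) (0, [])).2)) := by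
      unfold pvAPhase2
      simp only [PySem.List.pyGetD_zero_cons]
      have hfun : (fun i => decide ((h :: t :: rest).length ≠ 1) &&
            decide ((i + k * (((h :: t :: rest).length : Int) - 1))
              ∈ (PySem.List.pyGetD (h :: t :: rest) (-1) (0, [])).2))
          = (fun i => decide ((i + k * (((h :: t :: rest).length : Int) - 1))
              ∈ (PySem.List.pyGetD (h :: t :: rest) (-1) (0, [])).2)) := by
        funext i
        rw [decide_eq_true hne1, Bool.true_and]
      rw [hfun]
    simp only [hlenb, Bool.false_eq_true, if_false]
    rw [← hfeq]
    by_cases hfe : h.2.filter (pvPA (h :: t :: rest) k) = []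
    · have hany : h.2.any (pvPA (h :: t :: rest) k) = false :=
        List.any_eq_false.mpr (fun x hx hp =>
          (List.filter_eq_nil_iff.mp hfe x hx) hp)
      rw [hfe, hany, hp2]
      have hgt : decide ((h :: t :: rest).length > 1) = true := by simp
      simp only [beq_self_eq_true, if_true, bne_self_eq_false, Bool.false_eq_true, if_false,
        hgt, if_true, List.nil_append]
    · have hany : h.2.any (pvPA (h :: t :: rest) k) = true := by
        obtain ⟨x, hx⟩ := List.exists_mem_of_ne_nil _ hfe
        have := List.mem_filter.mp hx
        exact List.any_eq_true.mpr ⟨x, this.1, this.2⟩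
      have hbne : (h.2.filter (pvPA (h :: t :: rest) k) != []) = true := by
        rwa [bne_iff_ne]
      rw [hany, hbne]
      simp only [Bool.true_eq_false, beq_iff_eq, if_false, if_true]

-- ===== VERDICT (by name: the statement is the Claim_ definition above) =====
theorem link_reads_spec : Claim_equal_link_reads := by
  intro l_pos k _ hpre
  exact pv_main l_pos k hpre
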